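-- pv_equiv track=rewrite | github.com/legatoproject/LeTP | pytest_letp/tools/html_report/test_report.py | merge_status
-- ===== SOURCE A (Python) =====
-- def merge_status(list_status: list):
--     """Merge all status in the list."""
--     final_status = "PASSED"
--     for status in list_status:
--         if status == "FAILED":
--             return status
--         if status != "PASSED":
--             final_status = status
--     return final_status
-- ===== SOURCE B (Python) =====
-- def merge_status(list_status: list):
--     """Merge all status in the list."""
--     if "FAILED" in list_status:
--         return "FAILED"
--     others = [s for s in list_status if s != "PASSED"]
--     return others[-1] if others else "PASSED"
-- ===== Notes on version B (the rewrite author's own statement) =====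
-- stated objective: simpler
-- what changed: Replaces A's single early-exit loop with accumulator by a FAILED membership test followed by a filter keeping non-PASSED statuses and taking the last one.
import Mathlib
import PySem

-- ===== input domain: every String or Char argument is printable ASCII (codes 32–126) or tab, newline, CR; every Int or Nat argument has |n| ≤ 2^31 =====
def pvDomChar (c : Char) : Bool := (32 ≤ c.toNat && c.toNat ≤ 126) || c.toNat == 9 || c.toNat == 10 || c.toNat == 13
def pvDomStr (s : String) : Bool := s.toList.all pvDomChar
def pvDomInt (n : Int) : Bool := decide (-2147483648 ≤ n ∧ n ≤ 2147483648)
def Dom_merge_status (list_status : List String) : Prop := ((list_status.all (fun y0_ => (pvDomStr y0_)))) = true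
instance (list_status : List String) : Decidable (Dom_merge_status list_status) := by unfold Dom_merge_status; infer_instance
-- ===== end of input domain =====

-- B replaces A's single early-exit loop by a FAILED membership test plus a filter of non-PASSED statuses (simpler decomposition).

-- ===== PORT A =====
-- loop of A: early return on "FAILED", else update accumulator on non-"PASSED"
def mergeStatusLoop (final_status : String) : List String → String
  | [] => final_status
  | status :: rest =>
    if status = "FAILED" then status
    else if status ≠ "PASSED" then mergeStatusLoop status rest
    else mergeStatusLoop final_status rest

def merge_status (list_status : List String) : String :=
  mergeStatusLoop "PASSED" list_status

-- ===== PORT B =====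
def merge_status_alt (list_status : List String) : String :=
  if "FAILED" ∈ list_status then "FAILED"
  else
    let others := list_status.filter (fun s => s ≠ "PASSED")
    if others ≠ [] then others.getLastD "PASSED" else "PASSED"

-- ===== PRECONDITION & SPEC =====
def Spec_merge_status (list_status : List String) (out : String) : Prop := out = merge_status_alt list_status
instance (list_status : List String) (out : String) : Decidable (Spec_merge_status list_status out) := by unfold Spec_merge_status; infer_instance

-- ===== CLAIM (what is proved, stated in full; the proofs are below) =====
def Claim_equal_merge_status : Prop := ∀ (list_status : List String), Dom_merge_status list_status → Spec_merge_status list_status (merge_status list_status)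

-- ===== LEMMAS AND PROOFS =====
theorem mergeStatusLoop_eq (l : List String) : ∀ (acc : String), acc ≠ "FAILED" →
    mergeStatusLoop acc l =
      if "FAILED" ∈ l then "FAILED"
      else (l.filter (fun s => s ≠ "PASSED")).getLastD acc := by
  induction l with
  | nil => intro acc _; simp [mergeStatusLoop]
  | cons s rest ih =>
    intro acc hacc
    by_cases hf : s = "FAILED"
    · subst hf; simp [mergeStatusLoop]
    · by_cases hp : s = "PASSED"
      · subst hp
        simp only [mergeStatusLoop, if_neg (by decide : ¬("PASSED" = "FAILED"))]
        rw [ih acc hacc]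
        simp [List.mem_cons]
      · simp only [mergeStatusLoop, if_neg hf, if_pos (by simpa using hp), ne_eq]
        rw [ih s hf]
        by_cases hm : "FAILED" ∈ rest
        · simp [hm]
        · simp only [List.mem_cons, hm, or_false, if_false,
            if_neg (show ¬("FAILED" = s) from fun h => hf h.symm)]
          rw [List.filter_cons_of_pos (by simpa using hp)]
          rcases h : rest.filter (fun x => decide ¬x = "PASSED") with _ | ⟨a, t⟩
          · simp
          · simp [List.getLastD]

-- ===== VERDICT (by name: the statement is the Claim_ definition above) =====
theorem merge_status_spec : Claim_equal_merge_status := by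
  intro l _
  unfold Spec_merge_status merge_status merge_status_alt
  rw [mergeStatusLoop_eq l "PASSED" (by decide)]
  by_cases hm : "FAILED" ∈ l
  · simp [hm]
  · simp only [if_neg hm]
    rcases h : l.filter (fun s => decide ¬s = "PASSED") with _ | ⟨a, t⟩ <;> simp
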